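-- pv_equiv track=rewrite | github.com/AlexandreCharland/Kattis_Solution | 3/secretsanta/secretsanta.py | f
-- ===== SOURCE A (Python) =====
-- def f(cur,chois):
--     if(len(cur)==len(chois)):
--         return 1
--     else:
--         t=0
--         for i in range(len(chois)):
--             if(chois[i] and i!=len(cur)):
--                 chois[i]=False
--                 t+=f(cur+[i],chois)
--                 chois[i]=True
--         return t
-- ===== SOURCE B (Python) =====
-- def f(cur, chois):
--     # Inclusion-exclusion closed form instead of backtracking:
--     # positions len(cur)..n-1 each take a distinct still-available index i != position.
--     n = len(chois)
--     k = len(cur)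
--     if k > n:
--         return 0
--     m = n - k
--     s = sum(chois)
--     b = sum(1 for p in range(k, n) if chois[p])
--     total = 0
--     sign = 1
--     c = 1  # C(b, j)
--     for j in range(0, b + 1):
--         p = 1
--         for t in range(s - j, s - m, -1):
--             p *= t
--         total += sign * c * p
--         sign = -sign
--         c = c * (b - j) // (j + 1)
--     return total
-- ===== Notes on version B (the rewrite author's own statement) =====
-- stated objective: alternative
-- what changed: A counts completions by backtracking recursion over all partial assignments; B computes the same count in closed form by inclusion-exclusion over the forbidden diagonal cells (sum of (-1)^j C(b,j) * falling factorials), trading the recursive search for direct arithmetic.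
import Mathlib
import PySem

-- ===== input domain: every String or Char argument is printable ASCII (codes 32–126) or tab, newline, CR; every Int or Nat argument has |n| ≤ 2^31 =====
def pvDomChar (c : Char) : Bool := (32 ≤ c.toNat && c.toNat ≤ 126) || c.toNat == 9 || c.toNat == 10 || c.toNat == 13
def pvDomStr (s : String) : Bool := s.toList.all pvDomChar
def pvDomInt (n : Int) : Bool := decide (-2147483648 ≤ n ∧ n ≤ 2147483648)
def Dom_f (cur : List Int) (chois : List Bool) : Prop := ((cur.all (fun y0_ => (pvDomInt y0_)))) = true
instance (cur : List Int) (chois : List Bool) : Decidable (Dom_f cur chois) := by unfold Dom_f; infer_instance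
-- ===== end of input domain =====

-- B replaces A's backtracking search over completions by the inclusion-exclusion closed
-- formula for counting injections with forbidden diagonal cells (alternative algorithm;
-- return-value equivalence — A temporarily mutates `chois` but restores it before returning).

-- ===== PORT A =====
-- termination helper, cited by the port's decreasing_by
theorem pv_count_set_false_lt (l : List Bool) (i : Nat) (h : l.getD i false = true) :
    (l.set i false).count true < l.count true := by
  induction l generalizing i with
  | nil => simp at h
  | cons a t ih =>
    cases i with
    | zero => simp_all [List.count_cons]
    | succ j =>
      simp only [List.getD] at h
      have := ih j h
      simp [List.count_cons]
      omega

mutual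
def f (cur : List Int) (chois : List Bool) : Int :=
  if cur.length == chois.length then 1
  else fLoop cur chois 0 0
termination_by (chois.count true, 1, 0)
decreasing_by exact Prod.Lex.right _ (Prod.Lex.left _ _ Nat.zero_lt_one)

def fLoop (cur : List Int) (chois : List Bool) (t : Int) (i : Nat) : Int :=
  if h : i < chois.length then
    if h2 : chois.getD i false = true ∧ i ≠ cur.length then
      fLoop cur chois (t + f (cur ++ [(i : Int)]) (chois.set i false)) (i + 1)
    else fLoop cur chois t (i + 1)
  else t
termination_by (chois.count true, 0, chois.length - i)
decreasing_by
  · exact Prod.Lex.left _ _ (pv_count_set_false_lt chois i h2.1)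
  · exact Prod.Lex.right _ (Prod.Lex.right _ (by omega))
  · exact Prod.Lex.right _ (Prod.Lex.right _ (by omega))
end

-- ===== PORT B =====
def f_alt (cur : List Int) (chois : List Bool) : Int :=
  let n : Int := chois.length
  let k : Int := cur.length
  if k > n then 0
  else
    let m : Int := n - k
    let s : Int := chois.foldl (fun acc x => acc + (if x then 1 else 0)) 0
    let b : Int := (PySem.List.pyRange k n 1).foldl
      (fun acc p => if PySem.List.pyGetD chois p false = true then acc + 1 else acc) 0
    let st := (PySem.List.pyRange 0 (b + 1) 1).foldl
      (fun (st : Int × Int × Int) j =>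
        let p := (PySem.List.pyRange (s - j) (s - m) (-1)).foldl (fun p t => p * t) 1
        (st.1 + st.2.1 * st.2.2 * p, -st.2.1, PySem.Int.floordiv (st.2.2 * (b - j)) (j + 1)))
      (0, 1, 1)
    st.1

-- ===== PRECONDITION & SPEC =====
def Spec_f (cur : List Int) (chois : List Bool) (out : Int) : Prop := out = f_alt cur chois
instance (cur : List Int) (chois : List Bool) (out : Int) : Decidable (Spec_f cur chois out) := by unfold Spec_f; infer_instance

-- ===== CLAIM (what is proved, stated in full; the proofs are below) =====
def Claim_equal_f : Prop := ∀ (cur : List Int) (chois : List Bool), Dom_f cur chois → Spec_f cur chois (f cur chois)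

-- ===== LEMMAS AND PROOFS =====

-- inclusion-exclusion value: injections of (m) positions into (s) symbols avoiding (b) diagonal cells
def G (m s b : Nat) : Int :=
  ∑ j ∈ Finset.range (b + 1),
    (-1) ^ j * (Nat.choose b j : Int) * (Nat.descFactorial (s - j) (m - j) : Int)

theorem pv_df_peel (a r : Nat) (hr : 1 ≤ r) :
    (Nat.descFactorial a r : Int) = (a : Int) * (Nat.descFactorial (a - 1) (r - 1) : Int) := by
  cases a with
  | zero =>
    cases r with
    | zero => omega
    | succ r' => simp [Nat.zero_descFactorial_succ]
  | succ a' =>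
    cases r with
    | zero => omega
    | succ r' =>
      simp only [Nat.add_sub_cancel]
      rw [Nat.succ_descFactorial_succ]
      push_cast; ring

-- engine: absorb a factor t into G _ _ (t-1)
theorem pv_mulG (m' s' t : Nat) :
    (t : Int) * G m' s' (t - 1) = ∑ j ∈ Finset.range (t + 1),
      (-1) ^ j * (((t - j) * Nat.choose t j : Nat) : Int)
        * (Nat.descFactorial (s' - j) (m' - j) : Int) := by
  cases t with
  | zero => simp [G]
  | succ t' =>
    symm
    rw [Finset.sum_range_succ]
    have hz : ((t' + 1 - (t' + 1)) * Nat.choose (t' + 1) (t' + 1) : Nat) = 0 := by simp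
    rw [hz]
    simp only [Nat.cast_zero, mul_zero, zero_mul, add_zero]
    unfold G
    simp only [Nat.add_sub_cancel]
    rw [Finset.mul_sum]
    apply Finset.sum_congr rfl
    intro j hj
    symm
    have hj' : j ≤ t' := Nat.lt_succ_iff.mp (Finset.mem_range.mp hj)
    have hc : (t' + 1 - j) * Nat.choose (t' + 1) j = Nat.choose t' j * (t' + 1) := by
      rw [Nat.choose_mul_succ_eq]; ring
    rw [hc]
    push_cast
    ring

-- identity, current position's own symbol NOT available
theorem pv_I0 (m s b : Nat) (hm : 1 ≤ m) (hs : 1 ≤ s) (hb : b ≤ m - 1) (hbs : b ≤ s) :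
    G m s b = (s - b : Nat) * G (m - 1) (s - 1) b + (b : Int) * G (m - 1) (s - 1) (b - 1) := by
  rw [pv_mulG (m-1) (s-1) b]
  unfold G
  rw [Finset.mul_sum, ← Finset.sum_add_distrib]
  apply Finset.sum_congr rfl
  intro j hj
  have hj' : j ≤ b := Nat.lt_succ_iff.mp (Finset.mem_range.mp hj)
  rw [pv_df_peel (s - j) (m - j) (by omega)]
  have e1 : s - j - 1 = s - 1 - j := by omega
  have e2 : m - j - 1 = m - 1 - j := by omega
  rw [e1, e2]
  have e3 : ((s - j : Nat) : Int) = ((s - b : Nat) : Int) + ((b - j : Nat) : Int) := by omega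
  have e4 : ((s : Int)) - j = ((s - j : Nat) : Int) := by omega
  push_cast [← e4]
  rw [show ((s : Int) - j) = ((s - b : Nat) : Int) + ((b - j : Nat) : Int) by omega]
  push_cast
  ring

-- identity, current position's own symbol available (so it is one of the b diagonal cells)
theorem pv_I1 (m s b : Nat) (hm : 1 ≤ m) (hb : 1 ≤ b) (hbm : b ≤ m) (hbs : b ≤ s) :
    G m s b = (s - b : Nat) * G (m - 1) (s - 1) (b - 1) + ((b : Int) - 1) * G (m - 1) (s - 1) (b - 2) := by
  obtain ⟨b', rfl⟩ : ∃ b', b = b' + 1 := ⟨b - 1, by omega⟩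
  simp only [Nat.add_sub_cancel]
  rw [show b' + 1 - 2 = b' - 1 by omega,
      show ((b' + 1 : Nat) : Int) - 1 = (b' : Int) by push_cast; ring]
  rw [pv_mulG (m - 1) (s - 1) b']
  have hL : ∑ j ∈ Finset.range (b' + 1 + 1),
        (-1 : Int) ^ j * ((Nat.choose (b' + 1) j : Nat) : Int)
          * ((Nat.descFactorial (s - j) (m - j) : Nat) : Int)
      = ∑ j ∈ Finset.range (b' + 1),
        (-1 : Int) ^ j * ((Nat.choose b' j : Nat) : Int)
          * (((s : Int) - j - 1) * ((Nat.descFactorial (s - 1 - j) (m - 1 - j) : Nat) : Int)) := by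
    have hsplit : ∀ j ∈ Finset.range (b' + 1 + 1),
        (-1 : Int) ^ j * ((Nat.choose (b' + 1) j : Nat) : Int)
          * ((Nat.descFactorial (s - j) (m - j) : Nat) : Int)
        = ((-1 : Int) ^ j * ((Nat.choose b' j : Nat) : Int)
            * ((Nat.descFactorial (s - j) (m - j) : Nat) : Int))
          + (if j = 0 then 0 else (-1 : Int) ^ j * ((Nat.choose b' (j - 1) : Nat) : Int)
              * ((Nat.descFactorial (s - j) (m - j) : Nat) : Int)) := by
      intro j hj
      cases j with
      | zero => simp
      | succ i =>
        rw [if_neg (by omega), Nat.choose_succ_succ b' i]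
        simp only [Nat.add_sub_cancel]
        push_cast; ring
    rw [Finset.sum_congr rfl hsplit, Finset.sum_add_distrib]
    rw [Finset.sum_range_succ _ (b' + 1), Nat.choose_succ_self]
    simp only [Nat.cast_zero, mul_zero, zero_mul, add_zero]
    rw [Finset.sum_range_succ' _ (b' + 1)]
    simp only [Nat.succ_ne_zero, if_false, reduceIte, add_zero]
    rw [← Finset.sum_add_distrib]
    apply Finset.sum_congr rfl
    intro j hj
    have hj' : j ≤ b' := Nat.lt_succ_iff.mp (Finset.mem_range.mp hj)
    rw [pv_df_peel (s - j) (m - j) (by omega)]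
    rw [show s - j - 1 = s - 1 - j by omega, show m - j - 1 = m - 1 - j by omega,
        show s - (j + 1) = s - 1 - j by omega, show m - (j + 1) = m - 1 - j by omega,
        show ((s - j : Nat) : Int) = (s : Int) - j by omega,
        show j + 1 - 1 = j by omega, pow_succ]
    ring
  unfold G
  rw [Finset.mul_sum, ← Finset.sum_add_distrib, hL]
  apply Finset.sum_congr rfl
  intro j hj
  have hj' : j ≤ b' := Nat.lt_succ_iff.mp (Finset.mem_range.mp hj)
  rw [show ((s - (b' + 1) : Nat) : Int) = (s : Int) - b' - 1 by omega,
      show (((b' - j) * Nat.choose b' j : Nat) : Int) = ((b' : Int) - j) * ((Nat.choose b' j : Nat) : Int) by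
        push_cast [Nat.cast_sub hj']; ring]
  ring

theorem pv_fLoop_eq (cur : List Int) (chois : List Bool) (t : Int) (i : Nat) :
    fLoop cur chois t i = t + ∑ j ∈ Finset.Ico i chois.length,
      (if chois.getD j false = true ∧ j ≠ cur.length
       then f (cur ++ [(j : Int)]) (chois.set j false) else 0) := by
  have H : ∀ d t i, chois.length ≤ i + d →
      fLoop cur chois t i = t + ∑ j ∈ Finset.Ico i chois.length,
        (if chois.getD j false = true ∧ j ≠ cur.length
         then f (cur ++ [(j : Int)]) (chois.set j false) else 0) := by
    intro d
    induction d with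
    | zero =>
      intro t i hle
      rw [fLoop, dif_neg (by omega), Finset.Ico_eq_empty (by omega)]
      simp
    | succ d ih =>
      intro t i hle
      rw [fLoop]
      by_cases h : i < chois.length
      · rw [dif_pos h, Finset.sum_eq_sum_Ico_succ_bot h]
        by_cases h2 : chois.getD i false = true ∧ i ≠ cur.length
        · rw [dif_pos h2, ih _ (i+1) (by omega), if_pos h2]; ring
        · rw [dif_neg h2, ih _ (i+1) (by omega), if_neg h2]; ring
      · rw [dif_neg h, Finset.Ico_eq_empty (by omega)]
        simp
  exact H chois.length t i (by omega)

theorem pv_count_set_false_eq (l : List Bool) (i : Nat) (h : l.getD i false = true) :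
    (l.set i false).count true + 1 = l.count true := by
  induction l generalizing i with
  | nil => simp at h
  | cons a t ih =>
    cases i with
    | zero => simp_all [List.count_cons]
    | succ j =>
      simp only [List.getD] at h
      have := ih j h
      simp [List.count_cons]
      omega

-- A never completes once cur is longer than chois
theorem pv_f_over (cur : List Int) (chois : List Bool) (h : chois.length < cur.length) :
    f cur chois = 0 := by
  suffices H : ∀ s (cur : List Int) (chois : List Bool), chois.count true = s →
      chois.length < cur.length → f cur chois = 0 by
    exact H _ cur chois rfl h
  intro s
  induction s using Nat.strong_induction_on with
  | _ s IH =>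
    intro cur chois hs hlen
    rw [f]
    have hne : (cur.length == chois.length) = false := by
      simp only [beq_eq_false_iff_ne, ne_eq]; omega
    rw [hne]
    simp only [Bool.false_eq_true, if_false]
    rw [pv_fLoop_eq, zero_add]
    apply Finset.sum_eq_zero
    intro j hj
    split_ifs with hc
    · exact IH _ (by rw [← hs]; exact pv_count_set_false_lt chois j hc.1) _ _ rfl
        (by simp; omega)
    · rfl

theorem pv_sum_ite_count (l : List Bool) (x : Int) (a b : Nat) (hb : b ≤ l.length) :
    ∑ j ∈ Finset.Ico a b, (if l.getD j false = true then x else 0)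
      = (((l.take b).drop a).count true : Int) * x := by
  have H : ∀ d a b, b ≤ l.length → b ≤ a + d →
      ∑ j ∈ Finset.Ico a b, (if l.getD j false = true then x else 0)
        = (((l.take b).drop a).count true : Int) * x := by
    intro d
    induction d with
    | zero =>
      intro a b hb hd
      rw [Finset.Ico_eq_empty (by omega), List.drop_eq_nil_of_le (by simp; omega)]
      simp
    | succ d ih =>
      intro a b hb hd
      by_cases hab : a < b
      · rw [Finset.sum_eq_sum_Ico_succ_bot hab, ih (a+1) b hb (by omega)]
        have hlt : a < (l.take b).length := by simp; omega
        rw [List.drop_eq_getElem_cons hlt, List.count_cons]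
        have hget : l.getD a false = (l.take b)[a] := by
          rw [List.getElem_take, List.getD_eq_getElem l false (by omega)]
        rw [hget]
        cases h2 : (l.take b)[a] <;> simp <;> push_cast <;> ring
      · rw [Finset.Ico_eq_empty (by omega), List.drop_eq_nil_of_le (by simp; omega)]
        simp
  exact H b a b hb (by omega)

-- main invariant: A computes G of the three statistics
theorem pv_f_eq_G (cur : List Int) (chois : List Bool) (h : cur.length ≤ chois.length) :
    f cur chois = G (chois.length - cur.length) (chois.count true)
      ((chois.drop cur.length).count true) := by
  suffices H : ∀ s (cur : List Int) (chois : List Bool), chois.count true = s →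
      cur.length ≤ chois.length →
      f cur chois = G (chois.length - cur.length) s ((chois.drop cur.length).count true) by
    exact H _ cur chois rfl h
  intro s
  induction s using Nat.strong_induction_on with
  | _ s IH =>
  intro cur chois hs hk
  rcases Nat.eq_or_lt_of_le hk with heq | hlt
  · rw [f, if_pos (by simpa using heq)]
    rw [List.drop_eq_nil_of_le (by omega)]
    have h0 : chois.length - cur.length = 0 := by omega
    rw [h0]
    simp [G]
  · -- k < n
    rw [f, if_neg (by simp; omega), pv_fLoop_eq, zero_add]
    set n := chois.length with hn
    set k := cur.length with hkd
    set b := (chois.drop k).count true with hbdef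
    set c := (chois.drop (k+1)).count true with hcdef
    set X := G (n - k - 1) (s - 1) c with hX
    set Y := G (n - k - 1) (s - 1) (c - 1) with hY
    have hbm : b ≤ n - k := by
      rw [hbdef]; simpa using (List.count_le_length (l := chois.drop k) (a := true))
    have hcm : c ≤ n - (k+1) := by
      rw [hcdef]; simpa using (List.count_le_length (l := chois.drop (k+1)) (a := true))
    have hbs : b ≤ s := by
      rw [hbdef, ← hs]; exact (chois.drop_sublist k).count_le true
    have hdropk : chois.drop k = chois[k] :: chois.drop (k+1) := List.drop_eq_getElem_cons hlt
    have hbc : b = (if chois[k] = true then 1 else 0) + c := by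
      rw [hbdef, hdropk, List.count_cons]
      cases h2 : chois[k] <;> simp [h2] <;> omega
    have htk : (chois.take k).count true = s - b := by
      have := List.take_append_drop k chois
      have hcnt : (chois.take k).count true + (chois.drop k).count true = s := by
        rw [← List.count_append, this, hs]
      omega
    -- per-term rewriting
    have hterm : ∀ j ∈ Finset.Ico 0 n,
        (if chois.getD j false = true ∧ j ≠ k
         then f (cur ++ [(j : Int)]) (chois.set j false) else 0)
        = (if j < k then (if chois.getD j false = true then X else 0)
           else if j = k then 0
           else (if chois.getD j false = true then Y else 0)) := by
      intro j hj
      have hjn : j < n := by simpa using (Finset.mem_Ico.mp hj).2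
      by_cases hg : chois.getD j false = true
      · have hset_len : (chois.set j false).length = n := by simp; omega
        have hcnt1 : (chois.set j false).count true + 1 = s := by
          rw [← hs]; exact pv_count_set_false_eq chois j hg
        have hs1 : 1 ≤ s := by omega
        have hchild : ∀ bj, ((chois.set j false).drop (k+1)).count true = bj →
            f (cur ++ [(j : Int)]) (chois.set j false) = G (n - k - 1) (s - 1) bj := by
          intro bj hbj
          have := IH (s-1) (by omega) (cur ++ [(j : Int)]) (chois.set j false)
            (by omega) (by simp; omega)
          rw [this]
          have h1 : (chois.set j false).length - (cur ++ [(j:Int)]).length = n - k - 1 := by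
            simp; omega
          have h2 : (cur ++ [(j:Int)]).length = k + 1 := by simp; omega
          rw [h1, h2, hbj]
        rcases Nat.lt_trichotomy j k with hjk | hjk | hjk
        · rw [if_pos ⟨hg, by omega⟩, if_pos hjk, if_pos hg]
          apply hchild
          rw [List.drop_set, if_pos (by omega), ← hcdef]
        · rw [if_neg (fun hh => hh.2 hjk), if_neg (by omega), if_pos hjk]
        · rw [if_pos ⟨hg, by omega⟩, if_neg (by omega), if_neg (by omega), if_pos hg]
          apply hchild
          rw [List.drop_set, if_neg (by omega)]
          have hidx : (chois.drop (k+1)).getD (j - (k+1)) false = true := by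
            rw [List.getD_eq_getElem _ false (by simp; omega)]
            rw [List.getElem_drop]
            rw [← List.getD_eq_getElem chois false (by omega)] at *
            have : k + 1 + (j - (k+1)) = j := by omega
            rw [this]; exact hg
          have := pv_count_set_false_eq (chois.drop (k+1)) (j - (k+1)) hidx
          omega
      · rcases Nat.lt_trichotomy j k with hjk | hjk | hjk
        · rw [if_neg (by tauto), if_pos hjk, if_neg hg]
        · rw [if_neg (by tauto), if_neg (by omega), if_pos hjk]
        · rw [if_neg (by tauto), if_neg (by omega), if_neg (by omega), if_neg hg]
    rw [Finset.sum_congr rfl hterm]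
    rw [← Finset.sum_Ico_consecutive _ (Nat.zero_le k) (le_of_lt hlt)]
    have hsum1 : ∑ j ∈ Finset.Ico 0 k,
        (if j < k then (if chois.getD j false = true then X else 0)
         else if j = k then 0
         else (if chois.getD j false = true then Y else 0))
        = ((s - b : Nat) : Int) * X := by
      rw [Finset.sum_congr rfl (fun j hj => by
        rw [if_pos (by simpa using (Finset.mem_Ico.mp hj).2)])]
      rw [pv_sum_ite_count chois X 0 k (by omega), List.drop_zero, htk]
    have hsum2 : ∑ j ∈ Finset.Ico k n,
        (if j < k then (if chois.getD j false = true then X else 0)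
         else if j = k then 0
         else (if chois.getD j false = true then Y else 0))
        = (c : Int) * Y := by
      rw [Finset.sum_eq_sum_Ico_succ_bot hlt]
      rw [if_neg (by omega), if_pos rfl]
      rw [Finset.sum_congr rfl (fun j hj => by
        have := Finset.mem_Ico.mp hj
        rw [if_neg (by omega), if_neg (by omega)])]
      rw [pv_sum_ite_count chois Y (k+1) n (by omega), List.take_length, ← hcdef]
      ring
    rw [hsum1, hsum2]
    by_cases hkk : chois[k] = true
    · have hb1 : b = 1 + c := by rw [hbc, if_pos hkk]
      have hI := pv_I1 (n - k) s b (by omega) (by omega) (by omega) (by omega)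
      rw [hI]
      have e1 : b - 1 = c := by omega
      have e2 : b - 2 = c - 1 := by omega
      have e3 : (n : Nat) - k - 1 = n - k - 1 := rfl
      rw [e1, e2]
      have e4 : ((b : Int) - 1) = (c : Int) := by omega
      rw [e4]
    · have hb0 : b = c := by rw [hbc, if_neg hkk]; simp
      by_cases hs0 : s = 0
      · have hbz : b = 0 := by omega
        have hcz : c = 0 := by omega
        have hsb : s - b = 0 := by omega
        rw [hsb, hcz, hs0, hbz]
        obtain ⟨m', hm'⟩ : ∃ m', n - k = m' + 1 := ⟨n - k - 1, by omega⟩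
        rw [hm']
        simp [G, Nat.zero_descFactorial_succ]
      · have hI := pv_I0 (n - k) s b (by omega) (by omega) (by omega) (by omega)
        rw [hI, hb0]
  

theorem pv_foldl_mul (l : List Int) (x : Int) :
    l.foldl (fun p t => p * t) x = x * l.foldl (fun p t => p * t) 1 := by
  induction l generalizing x with
  | nil => simp
  | cons a t ih => simp only [List.foldl_cons]; rw [ih (x * a), ih (1 * a)]; ring

-- the inner Python loop: product of the m-j integers counting down = descending factorial
theorem pv_prod_desc (d a : Nat) :
    (PySem.List.pyRange (a : Int) ((a : Int) - (d : Int)) (-1)).foldl (fun p t => p * t) 1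
      = ((Nat.descFactorial a d : Nat) : Int) := by
  induction d generalizing a with
  | zero => rw [PySem.List.pyRange_neg_one_eq_nil (by omega)]; simp
  | succ d ih =>
    rw [PySem.List.pyRange_neg_one_cons (by omega)]
    simp only [List.foldl_cons, one_mul]
    rw [pv_foldl_mul]
    cases a with
    | zero =>
      simp
    | succ a' =>
      rw [show ((a' + 1 : Nat) : Int) - 1 = ((a' : Nat) : Int) by push_cast; ring,
          show ((a' + 1 : Nat) : Int) - ((d + 1 : Nat) : Int) = ((a' : Nat) : Int) - (d : Int) by push_cast; ring]
      rw [ih a', Nat.succ_descFactorial_succ]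
      push_cast; ring

theorem pv_sum_bools (l : List Bool) (x : Int) :
    l.foldl (fun acc b => acc + if b then 1 else 0) x = x + ((l.count true : Nat) : Int) := by
  induction l generalizing x with
  | nil => simp
  | cons a t ih =>
    simp only [List.foldl_cons, List.count_cons]
    rw [ih]
    cases a <;> simp <;> push_cast <;> ring

theorem pv_count_fold (l : List Bool) (x : Int) :
    l.foldl (fun acc v => if v = true then acc + 1 else acc) x = x + ((l.count true : Nat) : Int) := by
  induction l generalizing x with
  | nil => simp
  | cons a t ih =>
    simp only [List.foldl_cons, List.count_cons]
    cases a <;> rw [ih] <;> simp <;> push_cast <;> ring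

-- the main Python loop: running (total, sign, binomial) triple
theorem pv_loop (S M B : Nat) (hBM : B ≤ M) (hBS : B ≤ S) (t : Nat) (ht : t ≤ B + 1) :
    (PySem.List.pyRange 0 (t : Int) 1).foldl
      (fun (st : Int × Int × Int) j =>
        (st.1 + st.2.1 * st.2.2 *
            ((PySem.List.pyRange ((S : Int) - j) ((S : Int) - (M : Int)) (-1)).foldl
              (fun p t => p * t) 1),
         -st.2.1, PySem.Int.floordiv (st.2.2 * ((B : Int) - j)) (j + 1)))
      (0, 1, 1)
    = (∑ j ∈ Finset.range t,
         (-1) ^ j * ((Nat.choose B j : Nat) : Int) * ((Nat.descFactorial (S - j) (M - j) : Nat) : Int),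
       (-1) ^ t, ((Nat.choose B t : Nat) : Int)) := by
  induction t with
  | zero =>
    rw [show ((0 : Nat) : Int) = 0 by rfl, PySem.List.pyRange_one_eq_nil (by omega)]
    simp
  | succ t iht =>
    have ht' : t ≤ B := by omega
    rw [show ((t + 1 : Nat) : Int) = (t : Int) + 1 by push_cast; ring,
        PySem.List.pyRange_one_succ_right (by omega), List.foldl_append,
        iht (by omega)]
    simp only [List.foldl_cons, List.foldl_nil]
    refine Prod.ext ?_ (Prod.ext ?_ ?_)
    · show _ + _ = _
      rw [Finset.sum_range_succ]
      rw [show (S : Int) - (t : Int) = ((S - t : Nat) : Int) by omega,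
          show (S : Int) - (M : Int) = ((S - t : Nat) : Int) - ((M - t : Nat) : Int) by omega]
      rw [pv_prod_desc (M - t) (S - t)]
    · show -(-1 : Int) ^ t = (-1) ^ (t + 1)
      rw [pow_succ]; ring
    · show PySem.Int.floordiv (((Nat.choose B t : Nat) : Int) * ((B : Int) - (t : Int))) ((t : Int) + 1)
        = ((Nat.choose B (t + 1) : Nat) : Int)
      rw [show ((B : Int) - (t : Int)) = ((B - t : Nat) : Int) by omega,
          show ((t : Int) + 1) = ((t + 1 : Nat) : Int) by push_cast; ring,
          show ((Nat.choose B t : Nat) : Int) * ((B - t : Nat) : Int) = ((Nat.choose B t * (B - t) : Nat) : Int) by push_cast; ring]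
      rw [PySem.Int.floordiv_natCast]
      rw [← Nat.choose_succ_right_eq, Nat.mul_div_cancel _ (by omega)]

-- B's loops compute the same formula
theorem pv_falt_eq_G (cur : List Int) (chois : List Bool) (h : cur.length ≤ chois.length) :
    f_alt cur chois = G (chois.length - cur.length) (chois.count true)
      ((chois.drop cur.length).count true) := by
  simp only [f_alt]
  rw [if_neg (by omega)]
  have hS : chois.foldl (fun acc x => acc + (if x then 1 else 0)) 0 = ((chois.count true : Nat) : Int) := by
    rw [pv_sum_bools]; ring
  have hB : (PySem.List.pyRange (cur.length : Int) (chois.length : Int) 1).foldl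
      (fun acc p => if PySem.List.pyGetD chois p false = true then acc + 1 else acc) 0
      = (((chois.drop cur.length).count true : Nat) : Int) := by
    rw [PySem.List.foldl_pyRange_pyGetD' (f := fun acc v => if v = true then acc + 1 else acc)
        (xs := chois) (d := false) (init := 0) (by omega)]
    rw [pv_count_fold]
    simp
  rw [hS, hB]
  rw [show ((chois.length : Int) - (cur.length : Int)) = ((chois.length - cur.length : Nat) : Int) by omega]
  rw [show ((((chois.drop cur.length).count true : Nat) : Int) + 1)
        = (((chois.drop cur.length).count true + 1 : Nat) : Int) by push_cast; ring]
  rw [pv_loop (chois.count true) (chois.length - cur.length) ((chois.drop cur.length).count true)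
      (by simpa using (List.count_le_length (l := chois.drop cur.length) (a := true)))
      ((chois.drop_sublist cur.length).count_le true)
      _ le_rfl]
  rfl

theorem pv_falt_over (cur : List Int) (chois : List Bool) (h : chois.length < cur.length) :
    f_alt cur chois = 0 := by
  simp only [f_alt]
  rw [if_pos (by omega)]

-- ===== VERDICT (by name: the statement is the Claim_ definition above) =====
theorem f_spec : Claim_equal_f := by
  intro cur chois _
  unfold Spec_f
  rcases Nat.lt_or_ge chois.length cur.length with h | h
  · rw [pv_f_over cur chois h, pv_falt_over cur chois h]
  · rw [pv_f_eq_G cur chois h, pv_falt_eq_G cur chois h]
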